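-- pv_equiv track=rewrite | github.com/AzeemWaqar-R3BIRTH/SecureTrainer | app/ai/challenge_engine.py | _calculate_consecutive_performance
-- ===== SOURCE A (Python) =====
-- from typing import Dict, List, Any, Tuple, Optional
--
-- def _calculate_consecutive_performance(user_history: List[Dict[str, Any]]) -> Tuple[int, int]:
--     """Calculate consecutive successes and failures."""
--     if not user_history:
--         return 0, 0
--
--     successes = 0
--     failures = 0
--
--     # Count from the most recent attempts backwards
--     for attempt in reversed(user_history):
--         if attempt.get('is_correct', False):
--             if failures == 0:  # Still counting successes
--                 successes += 1
--             else:  # Hit a failure, stop counting successes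
--                 break
--         else:
--             if successes == 0:  # Still counting failures
--                 failures += 1
--             else:  # Hit a success, stop counting failures
--                 break
--
--     return successes, failures
-- ===== SOURCE B (Python) =====
-- from typing import Dict, List, Any, Tuple
--
-- def _calculate_consecutive_performance(user_history: List[Dict[str, Any]]) -> Tuple[int, int]:
--     # Forward pass: run-length-encode the correctness sequence, then read off the last run.
--     runs = []  # list of [value, length], in order
--     for attempt in user_history:
--         v = bool(attempt.get('is_correct', False))
--         if runs and runs[-1][0] == v:
--             runs[-1][1] += 1
--         else:
--             runs.append([v, 1])
--     if not runs:
--         return 0, 0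
--     v, n = runs[-1]
--     return (n, 0) if v else (0, n)
-- ===== Notes on version B (the rewrite author's own statement) =====
-- stated objective: alternative
-- what changed: B traverses the history FORWARD once, run-length-encoding the correctness sequence into a list of runs, and reads the answer off the last run; A walks BACKWARD with two interleaved counters and a break.
import Mathlib
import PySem

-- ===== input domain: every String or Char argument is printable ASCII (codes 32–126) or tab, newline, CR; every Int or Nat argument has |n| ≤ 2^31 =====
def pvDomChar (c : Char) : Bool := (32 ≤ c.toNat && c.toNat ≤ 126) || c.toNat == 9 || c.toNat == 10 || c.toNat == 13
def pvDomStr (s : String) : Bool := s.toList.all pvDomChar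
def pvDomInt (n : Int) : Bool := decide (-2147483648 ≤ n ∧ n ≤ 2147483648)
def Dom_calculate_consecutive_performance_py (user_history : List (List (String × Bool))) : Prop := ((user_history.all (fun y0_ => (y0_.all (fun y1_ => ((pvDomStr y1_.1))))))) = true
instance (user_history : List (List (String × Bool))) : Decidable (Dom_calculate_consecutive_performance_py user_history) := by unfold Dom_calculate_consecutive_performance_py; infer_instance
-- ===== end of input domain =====

-- B (alternative): forward run-length-encoding pass reading the last run, instead of A's
-- backward dual-counter loop with a break.


-- shared by both ports: the truthiness of attempt.get('is_correct', False)
def fval (a : List (String × Bool)) : Bool := PySem.Dict.getD (PySem.Dict.mk a) "is_correct" false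

-- ===== PORT A =====
-- A: dual counters walked backwards; `goA_calc` is the loop over reversed(user_history)
-- with state (successes, failures) and break as early return.
def goA_calc : List (List (String × Bool)) → Int → Int → Int × Int
  | [], s, f => (s, f)
  | a :: rest, s, f =>
    if fval a then
      (if f = 0 then goA_calc rest (s + 1) f else (s, f))
    else
      (if s = 0 then goA_calc rest s (f + 1) else (s, f))

def calculate_consecutive_performance_py (user_history : List (List (String × Bool))) : Int × Int :=
  if user_history = [] then (0, 0)
  else goA_calc user_history.reverse 0 0

-- ===== PORT B =====
-- B: forward loop building the run-length encoding of the correctness sequence.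
-- The runs list is kept most-recent-run-first (head = Python's runs[-1]); mutating
-- runs[-1][1] += 1 is replacing the head, runs.append is consing a new head.
def goB_runs : List (List (String × Bool)) → List (Bool × Int) → List (Bool × Int)
  | [], runs => runs
  | a :: rest, runs =>
    match runs with
    | (w, n) :: rs => if w = fval a then goB_runs rest ((w, n + 1) :: rs)
                      else goB_runs rest ((fval a, 1) :: (w, n) :: rs)
    | [] => goB_runs rest [(fval a, 1)]

def calculate_consecutive_performance_py_alt (user_history : List (List (String × Bool))) : Int × Int :=
  match goB_runs user_history [] with
  | [] => (0, 0)
  | (v, n) :: _ => if v then (n, 0) else (0, n)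

-- ===== PRECONDITION & SPEC =====
def Spec_calculate_consecutive_performance_py (user_history : List (List (String × Bool))) (out : Int × Int) : Prop := out = calculate_consecutive_performance_py_alt user_history
instance (user_history : List (List (String × Bool))) (out : Int × Int) : Decidable (Spec_calculate_consecutive_performance_py user_history out) := by unfold Spec_calculate_consecutive_performance_py; infer_instance

-- ===== CLAIM (what is proved, stated in full; the proofs are below) =====
def Claim_equal_calculate_consecutive_performance_py : Prop := ∀ (user_history : List (List (String × Bool))), Dom_calculate_consecutive_performance_py user_history → Spec_calculate_consecutive_performance_py user_history (calculate_consecutive_performance_py user_history)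

-- ===== LEMMAS AND PROOFS =====

-- reference counter: length of the leading run of value v in a (reversed) list
def trailCnt (v : Bool) : List (List (String × Bool)) → Int → Int
  | [], c => c
  | a :: rest, c => if fval a = v then trailCnt v rest (c + 1) else c

theorem trailCnt_shift (v : Bool) (r : List (List (String × Bool))) :
    ∀ c : Int, trailCnt v r c = trailCnt v r 0 + c := by
  induction r with
  | nil => intro c; simp [trailCnt]
  | cons a rest ih =>
    intro c
    simp only [trailCnt]
    by_cases h : fval a = v
    · simp only [h, if_true]; rw [ih (c + 1), ih (0 + 1)]; ring
    · simp [h]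

theorem trailCnt_cons_pos (v : Bool) (a : List (String × Bool))
    (r : List (List (String × Bool))) (h : fval a = v) :
    trailCnt v (a :: r) 0 = trailCnt v r 0 + 1 := by
  simp only [trailCnt, h, if_pos]
  rw [trailCnt_shift]; norm_num

theorem trailCnt_cons_neg (v : Bool) (a : List (String × Bool))
    (r : List (List (String × Bool))) (h : ¬ fval a = v) :
    trailCnt v (a :: r) 0 = 0 := by
  simp [trailCnt, h]

-- A's success phase (s ≥ 1, f = 0) is the reference counter.
theorem goA_succ (r : List (List (String × Bool))) : ∀ (s : Int), 1 ≤ s →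
    goA_calc r s 0 = (trailCnt true r s, 0) := by
  induction r with
  | nil => intro s hs; simp [goA_calc, trailCnt]
  | cons a rest ih =>
    intro s hs
    have hs0 : ¬ s = 0 := by omega
    simp only [goA_calc, trailCnt]
    by_cases h : fval a
    · simp [h, ih (s + 1) (by omega)]
    · simp [h, hs0]

-- A's failure phase (f ≥ 1, s = 0) likewise.
theorem goA_fail (r : List (List (String × Bool))) : ∀ (f : Int), 1 ≤ f →
    goA_calc r 0 f = (0, trailCnt false r f) := by
  induction r with
  | nil => intro f hf; simp [goA_calc, trailCnt]
  | cons a rest ih =>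
    intro f hf
    have hf0 : ¬ f = 0 := by omega
    simp only [goA_calc, trailCnt]
    by_cases h : fval a
    · simp [h, hf0]
    · simp [h, ih (f + 1) (by omega)]

-- B's forward RLE loop splits over an append.
theorem goB_append (xs ys : List (List (String × Bool))) :
    ∀ runs, goB_runs (xs ++ ys) runs = goB_runs ys (goB_runs xs runs) := by
  induction xs with
  | nil => intro runs; simp [goB_runs]
  | cons a rest ih =>
    intro runs
    simp only [List.cons_append, goB_runs]
    rcases runs with _ | ⟨⟨w, n⟩, rs⟩
    · exact ih _
    · by_cases h : w = fval a
      · simp only [if_pos h]; exact ih _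
      · simp only [if_neg h]; exact ih _

-- The head of B's run list is (value of last element, trailing-run length).
theorem goB_head (xs : List (List (String × Bool))) : ∀ h t, xs.reverse = h :: t →
    ∃ rs, goB_runs xs [] = (fval h, trailCnt (fval h) (h :: t) 0) :: rs := by
  induction xs using List.reverseRecOn with
  | nil => intro h t hrev; simp at hrev
  | append_singleton xs b ih =>
    intro hd tl hrev
    have hrev' : b :: xs.reverse = hd :: tl := by simpa using hrev
    injection hrev' with hb ht
    subst hb; subst ht
    rw [goB_append xs [b]]
    rcases hxs : xs.reverse with _ | ⟨h', t'⟩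
    · have : xs = [] := by simpa using congrArg List.reverse hxs
      subst this
      refine ⟨[], ?_⟩
      simp [goB_runs, trailCnt]
    · obtain ⟨rs, hgo⟩ := ih h' t' hxs
      rw [hgo]
      simp only [goB_runs]
      by_cases hv : fval h' = fval b
      · refine ⟨rs, ?_⟩
        rw [if_pos hv, hv, trailCnt_cons_pos (fval b) b (h' :: t') rfl]
      · refine ⟨(fval h', trailCnt (fval h') (h' :: t') 0) :: rs, ?_⟩
        rw [if_neg hv, trailCnt_cons_pos (fval b) b (h' :: t') rfl,
            trailCnt_cons_neg (fval b) h' t' hv]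
        norm_num

-- ===== VERDICT (by name: the statement is the Claim_ definition above) =====
theorem calculate_consecutive_performance_py_spec : Claim_equal_calculate_consecutive_performance_py := by
  intro user_history _
  unfold Spec_calculate_consecutive_performance_py
  unfold calculate_consecutive_performance_py calculate_consecutive_performance_py_alt
  by_cases hnil : user_history = []
  · simp [hnil, goB_runs]
  · have hr : user_history.reverse ≠ [] := by simpa using hnil
    rcases hrev : user_history.reverse with _ | ⟨a, rest⟩
    · exact absurd hrev hr
    · obtain ⟨rs, hgo⟩ := goB_head user_history a rest hrev
      rw [hgo]
      simp only [hnil, if_false]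
      by_cases h : fval a
      · have h1 : goA_calc rest 1 0 = (trailCnt true rest 1, 0) := goA_succ rest 1 (by omega)
        simp [goA_calc, trailCnt, h, h1]
      · have h1 : goA_calc rest 0 1 = (0, trailCnt false rest 1) := goA_fail rest 1 (by omega)
        simp [goA_calc, trailCnt, h, h1]
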